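-- pv_equiv track=rewrite | github.com/windy-purple/parserDex | 类解析/parseClass.py | getAccessFlags
-- ===== SOURCE A (Python) =====
-- def getAccessFlags(flag):
--     accessFlag = ''
--     flagList = [0x01,0x02,0x04,0x08,0x10,0x20,0x40,0x80,0x100,0x200,0x400,0x800,0x2000,0x4000,0x10000]
--     flagdict = {0x01:'public',0x02:'private',0x04:'protected',0x08:'static',0x10:'final',0x20:'synchronized',0x40:'volatile',0x80:'transient',0x100:'native',\
--         0x200:'interface',0x400:'abstract',0x800:'strictfp',0x2000:'annotayion',0x4000:'enum',0x10000:'constructor'}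
--     if flag == 0x1:
--         accessFlag = 'public'
--     elif flag == 0x2:
--         accessFlag = 'private'
--     elif flag == 0x4:
--         accessFlag = 'protected'
--     elif flag == 0x8:
--         accessFlag = 'static'
--     elif flag == 0x10:
--         accessFlag = 'final'
--     elif flag == 0x20:
--         accessFlag = 'synchronized'
--     elif flag == 0x40:
--         accessFlag = 'volatile'
--     elif flag == 0x80:
--         accessFlag = 'transient'
--     elif flag == 0x100:
--         accessFlag = 'native'
--     elif flag == 0x200:
--         accessFlag = 'interface'
--     elif flag == 0x400:
--         accessFlag = 'abstract'
--     elif flag == 0x800: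
--         accessFlag = 'strictfp'
--     elif flag == 0x2000:
--         accessFlag = flagdict[0x2000]
--     elif flag == 0x4000:
--         accessFlag = flagdict[0x4000]
--     elif flag == 0x10000:
--         accessFlag = flagdict[0x10000]
--     else:
--         mark = 0
--         for k in range(14):
--             if mark == 1:
--                 break
--             for item in flagList[(k + 1):]:
--                 if flag == (flagList[k] | item):
--                     idx1 = flagList[k]
--                     idx2 = item
--                     accessFlag = flagdict[idx1] + ' ' + flagdict[idx2]
--                     mark = 1
--                     break
--     return accessFlag
-- ===== SOURCE B (Python) =====
-- def getAccessFlags(flag):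
--     flagList = [0x01,0x02,0x04,0x08,0x10,0x20,0x40,0x80,0x100,0x200,0x400,0x800,0x2000,0x4000,0x10000]
--     flagdict = {0x01:'public',0x02:'private',0x04:'protected',0x08:'static',0x10:'final',0x20:'synchronized',0x40:'volatile',0x80:'transient',0x100:'native',
--         0x200:'interface',0x400:'abstract',0x800:'strictfp',0x2000:'annotayion',0x4000:'enum',0x10000:'constructor'}
--     bits = [b for b in flagList if flag & b]
--     total = 0
--     for b in bits:
--         total |= b
--     if total != flag:
--         return ''
--     if len(bits) == 1:
--         return flagdict[bits[0]]
--     if len(bits) == 2: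
--         return flagdict[bits[0]] + ' ' + flagdict[bits[1]]
--     return ''
-- ===== Notes on version B (the rewrite author's own statement) =====
-- stated objective: simpler
-- what changed: Replaces the long if/elif chain plus the nested O(n^2) mark/break pair scan by one bit-decomposition pass: collect the listed bits set in flag, check their OR reconstructs flag, and name the one or two bits found.
import Mathlib
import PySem

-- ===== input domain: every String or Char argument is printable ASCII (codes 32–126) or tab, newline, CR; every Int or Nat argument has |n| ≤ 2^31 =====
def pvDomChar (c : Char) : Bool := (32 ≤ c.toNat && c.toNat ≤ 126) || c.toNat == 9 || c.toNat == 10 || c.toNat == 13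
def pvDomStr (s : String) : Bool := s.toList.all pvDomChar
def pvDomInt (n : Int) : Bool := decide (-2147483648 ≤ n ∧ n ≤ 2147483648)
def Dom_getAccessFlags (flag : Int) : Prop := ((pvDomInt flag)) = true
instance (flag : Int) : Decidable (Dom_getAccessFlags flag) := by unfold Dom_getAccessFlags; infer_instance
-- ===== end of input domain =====

-- B replaces A's 15-way if/elif chain plus nested O(n^2) pair scan by a single
-- bit-decomposition pass over the flag list (simpler; same return value everywhere).

-- ===== PORT A =====
def pvFlagList : List Int :=
  [0x01,0x02,0x04,0x08,0x10,0x20,0x40,0x80,0x100,0x200,0x400,0x800,0x2000,0x4000,0x10000]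

def pvFlagDict : PySem.Dict Int String :=
  PySem.Dict.ofList [(0x01,"public"),(0x02,"private"),(0x04,"protected"),(0x08,"static"),
    (0x10,"final"),(0x20,"synchronized"),(0x40,"volatile"),(0x80,"transient"),(0x100,"native"),
    (0x200,"interface"),(0x400,"abstract"),(0x800,"strictfp"),(0x2000,"annotayion"),
    (0x4000,"enum"),(0x10000,"constructor")]

-- inner 'for item in flagList[(k+1):]' with break: first matching item gives the string
def pvInner (flag fk : Int) : List Int → Option String
  | [] => none
  | item :: rest =>
      if flag = PySem.Int.bor fk item then
        some (pvFlagDict.getD fk "" ++ " " ++ pvFlagDict.getD item "")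
      else pvInner flag fk rest

-- outer 'for k in range(14)' with the mark/break flag: stop at the first k whose inner scan hits
def pvOuter (flag : Int) : List Nat → String
  | [] => ""
  | k :: rest =>
      match pvInner flag (pvFlagList.getD k 0) (pvFlagList.drop (k + 1)) with
      | some s => s
      | none => pvOuter flag rest

def getAccessFlags (flag : Int) : String :=
  if flag = 0x1 then "public"
  else if flag = 0x2 then "private"
  else if flag = 0x4 then "protected"
  else if flag = 0x8 then "static"
  else if flag = 0x10 then "final"
  else if flag = 0x20 then "synchronized"
  else if flag = 0x40 then "volatile"
  else if flag = 0x80 then "transient"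
  else if flag = 0x100 then "native"
  else if flag = 0x200 then "interface"
  else if flag = 0x400 then "abstract"
  else if flag = 0x800 then "strictfp"
  else if flag = 0x2000 then pvFlagDict.getD 0x2000 ""
  else if flag = 0x4000 then pvFlagDict.getD 0x4000 ""
  else if flag = 0x10000 then pvFlagDict.getD 0x10000 ""
  else pvOuter flag (List.range 14)

-- ===== PORT B =====
def getAccessFlags_alt (flag : Int) : String :=
  let bits := pvFlagList.filter (fun b => PySem.Int.band flag b ≠ 0)
  let total := bits.foldl (fun t b => PySem.Int.bor t b) 0
  if total ≠ flag then ""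
  else match bits with
    | [b] => pvFlagDict.getD b ""
    | [b1, b2] => pvFlagDict.getD b1 "" ++ " " ++ pvFlagDict.getD b2 ""
    | _ => ""

-- ===== PRECONDITION & SPEC =====
def Spec_getAccessFlags (flag : Int) (out : String) : Prop := out = getAccessFlags_alt flag
instance (flag : Int) (out : String) : Decidable (Spec_getAccessFlags flag out) := by unfold Spec_getAccessFlags; infer_instance

-- ===== CLAIM (what is proved, stated in full; the proofs are below) =====
def Claim_equal_getAccessFlags : Prop := ∀ (flag : Int), Dom_getAccessFlags flag → Spec_getAccessFlags flag (getAccessFlags flag)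

-- ===== LEMMAS AND PROOFS =====

-- all ORs of ordered pairs of a list
def pvPairsOf : List Int → List Int
  | [] => []
  | x :: xs => xs.map (fun y => PySem.Int.bor x y) ++ pvPairsOf xs

-- the finitely many flags on which either program can answer nonempty
def pvS : List Int := pvFlagList ++ pvPairsOf pvFlagList

set_option maxRecDepth 40000 in
theorem pv_allEq : ∀ f ∈ pvS, getAccessFlags f = getAccessFlags_alt f := by
  decide

theorem pv_mem_pairsOf_of_sublist {b1 b2 : Int} {l : List Int}
    (h : [b1, b2].Sublist l) : PySem.Int.bor b1 b2 ∈ pvPairsOf l := by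
  induction l with
  | nil => cases h
  | cons x xs ih =>
      cases h with
      | cons _ h' => exact List.mem_append_right _ (ih h')
      | cons₂ _ h' =>
          exact List.mem_append_left _ (List.mem_map.mpr ⟨b2, h'.mem (by simp), rfl⟩)

theorem pv_inner_none {flag fk : Int} {items : List Int}
    (h : ∀ item ∈ items, flag ≠ PySem.Int.bor fk item) :
    pvInner flag fk items = none := by
  induction items with
  | nil => rfl
  | cons item rest ih =>
      simp only [pvInner]
      rw [if_neg (h item (by simp))]
      exact ih (fun i hi => h i (by simp [hi]))

theorem pv_getD_or_mem_pairs {l : List Int} :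
    ∀ (k : Nat), k < l.length → ∀ item ∈ l.drop (k + 1),
      PySem.Int.bor (l.getD k 0) item ∈ pvPairsOf l := by
  induction l with
  | nil => intro k hk; exact absurd hk (by simp)
  | cons x xs ih =>
      intro k hk item hitem
      cases k with
      | zero =>
          simp only [List.getD_cons_zero]
          exact List.mem_append_left _ (List.mem_map.mpr ⟨item, by simpa using hitem, rfl⟩)
      | succ k =>
          simp only [List.getD_cons_succ]
          exact List.mem_append_right _ (ih k (by simpa using hk) item (by simpa using hitem))

theorem pv_outer_empty {flag : Int}
    (h : ∀ p ∈ pvPairsOf pvFlagList, flag ≠ p) :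
    ∀ ks : List Nat, (∀ k ∈ ks, k < pvFlagList.length) → pvOuter flag ks = "" := by
  intro ks
  induction ks with
  | nil => intro _; rfl
  | cons k rest ih =>
      intro hk
      simp only [pvOuter]
      rw [pv_inner_none (fun item hitem =>
        h _ (pv_getD_or_mem_pairs k (hk k (by simp)) item hitem))]
      exact ih (fun j hj => hk j (by simp [hj]))

theorem pv_A_empty {flag : Int} (h : ∀ x ∈ pvS, flag ≠ x) : getAccessFlags flag = "" := by
  have hp : ∀ p ∈ pvPairsOf pvFlagList, flag ≠ p :=
    fun p hp => h p (List.mem_append_right _ hp)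
  have hs : ∀ x ∈ pvFlagList, flag ≠ x :=
    fun x hx => h x (List.mem_append_left _ hx)
  unfold getAccessFlags
  rw [if_neg (hs 0x1 (by decide)), if_neg (hs 0x2 (by decide)), if_neg (hs 0x4 (by decide)),
      if_neg (hs 0x8 (by decide)), if_neg (hs 0x10 (by decide)), if_neg (hs 0x20 (by decide)),
      if_neg (hs 0x40 (by decide)), if_neg (hs 0x80 (by decide)), if_neg (hs 0x100 (by decide)),
      if_neg (hs 0x200 (by decide)), if_neg (hs 0x400 (by decide)), if_neg (hs 0x800 (by decide)),
      if_neg (hs 0x2000 (by decide)), if_neg (hs 0x4000 (by decide)),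
      if_neg (hs 0x10000 (by decide))]
  exact pv_outer_empty hp (List.range 14) (by decide)

theorem pv_B_empty {flag : Int} (h : ∀ x ∈ pvS, flag ≠ x) : getAccessFlags_alt flag = "" := by
  unfold getAccessFlags_alt
  by_cases ht : (pvFlagList.filter (fun b => PySem.Int.band flag b ≠ 0)).foldl
      (fun t b => PySem.Int.bor t b) 0 = flag
  · rw [if_neg (not_not_intro ht)]
    have hsub : (pvFlagList.filter (fun b => decide (PySem.Int.band flag b ≠ 0))).Sublist pvFlagList :=
      List.filter_sublist
    rcases hb : pvFlagList.filter (fun b => PySem.Int.band flag b ≠ 0) with _ | ⟨b1, _ | ⟨b2, _ | ⟨b3, tl⟩⟩⟩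
    · rfl
    · -- one bit: flag = b1 ∈ pvFlagList, contradicting h
      exfalso
      rw [hb] at ht hsub
      simp only [List.foldl_cons, List.foldl_nil] at ht
      rw [PySem.Int.bor_comm, PySem.Int.bor_zero] at ht
      exact h b1 (List.mem_append_left _ (hsub.mem (by simp))) ht.symm
    · -- two bits: flag = b1 ||| b2 ∈ pvPairsOf pvFlagList, contradicting h
      exfalso
      rw [hb] at ht hsub
      simp only [List.foldl_cons, List.foldl_nil] at ht
      rw [PySem.Int.bor_comm 0 b1, PySem.Int.bor_zero] at ht
      exact h _ (List.mem_append_right _ (pv_mem_pairsOf_of_sublist hsub)) ht.symm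
    · rfl
  · rw [if_pos ht]

-- ===== VERDICT (by name: the statement is the Claim_ definition above) =====
theorem getAccessFlags_spec : Claim_equal_getAccessFlags := by
  intro flag _
  unfold Spec_getAccessFlags
  by_cases hmem : flag ∈ pvS
  · exact pv_allEq flag hmem
  · have h : ∀ x ∈ pvS, flag ≠ x := fun x hx e => hmem (e ▸ hx)
    rw [pv_A_empty h, pv_B_empty h]
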